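-- pv_equiv track=rewrite | github.com/urlawebsite/ArchiveC200 | Assignment4/a4.py | blist
-- ===== SOURCE A (Python) =====
-- def blist(lst):
--     for i in range(len(lst)):
--         if lst[1] == 1:
--             return max(lst[0])-(min(lst[0]))
--         else:
--             small = [abs(j) for j in lst[0]]
--             small.sort()
--             smallest = small[0] - small[1]
--             return abs(smallest)
-- ===== SOURCE B (Python) =====
-- def blist(lst):
--     if lst[1] == 1:
--         return max(lst[0]) - min(lst[0])
--     a = abs(lst[0][0])
--     b = abs(lst[0][1])
--     if b < a:
--         a, b = b, a
--     for j in lst[0][2:]: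
--         v = abs(j)
--         if v < a:
--             a, b = v, a
--         elif v < b:
--             b = v
--     return b - a
-- ===== Notes on version B (the rewrite author's own statement) =====
-- stated objective: faster
-- what changed: The else branch no longer builds an abs list and sorts it: B does one pass over lst[0] maintaining the two smallest absolute values and returns their difference; the lst[1]==1 branch is unchanged.
import Mathlib
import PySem

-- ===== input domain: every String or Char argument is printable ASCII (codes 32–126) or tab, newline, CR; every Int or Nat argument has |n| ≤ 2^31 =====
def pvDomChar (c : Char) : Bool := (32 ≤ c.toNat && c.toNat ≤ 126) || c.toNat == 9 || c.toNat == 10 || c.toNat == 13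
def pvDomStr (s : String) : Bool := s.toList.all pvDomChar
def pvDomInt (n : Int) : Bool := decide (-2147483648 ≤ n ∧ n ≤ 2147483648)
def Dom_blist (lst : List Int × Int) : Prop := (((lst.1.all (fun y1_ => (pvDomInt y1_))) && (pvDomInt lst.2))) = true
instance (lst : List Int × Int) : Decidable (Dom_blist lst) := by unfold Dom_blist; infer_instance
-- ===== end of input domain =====

-- B replaces A's build-abs-list-then-sort else branch by a single pass that keeps the two
-- smallest absolute values (a different algorithm; the lst[1] == 1 branch is unchanged).

-- ===== PORT A =====
-- A's 'for i in range(len(lst))' runs its body at i = 0 and both branches return there,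
-- so the loop body is ported directly (lst is a pair, so len(lst) = 2 > 0).
def blist (lst : List Int × Int) : Int :=
  if lst.2 = 1 then
    (PySem.List.max? lst.1 (fun x => x)).getD 0 - (PySem.List.min? lst.1 (fun x => x)).getD 0
  else
    let small := PySem.List.sorted (lst.1.map (fun j => |j|)) (fun x => x) false
    let smallest := (PySem.List.pyGet? small 0).getD 0 - (PySem.List.pyGet? small 1).getD 0
    |smallest|

-- ===== PORT B =====
-- loop body of Source B: 'v = abs(j); if v < a: a, b = v, a elif v < b: b = v'
def blistStep (p : Int × Int) (j : Int) : Int × Int :=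
  let v := |j|
  if v < p.1 then (v, p.1)
  else if v < p.2 then (p.1, v)
  else p

def blist_alt (lst : List Int × Int) : Int :=
  if lst.2 = 1 then
    (PySem.List.max? lst.1 (fun x => x)).getD 0 - (PySem.List.min? lst.1 (fun x => x)).getD 0
  else
    match lst.1 with
    | x :: y :: rest =>
        let a := |x|
        let b := |y|
        let p := if b < a then (b, a) else (a, b)
        let q := rest.foldl blistStep p
        q.2 - q.1
    | _ => 0   -- lst[0][0] / lst[0][1] raise IndexError in Python here; excluded by Pre_blist

-- ===== PRECONDITION & SPEC =====
-- Pre_ excludes exactly the inputs on which the Python A raises: an empty list with flag 1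
-- (max()/min() of an empty list → ValueError) and a list of fewer than 2 elements with any
-- other flag (small[1] → IndexError); B raises on exactly the same inputs.
def Pre_blist (lst : List Int × Int) : Prop :=
  (lst.2 = 1 → lst.1 ≠ []) ∧ (lst.2 ≠ 1 → 2 ≤ lst.1.length)
instance (lst : List Int × Int) : Decidable (Pre_blist lst) := by unfold Pre_blist; infer_instance

def pvWitness_blist : (List Int × Int) := ([3, -1, 4], 0)

def Spec_blist (lst : List Int × Int) (out : Int) : Prop := out = blist_alt lst
instance (lst : List Int × Int) (out : Int) : Decidable (Spec_blist lst out) := by unfold Spec_blist; infer_instance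

-- ===== CLAIM (what is proved, stated in full; the proofs are below) =====
def Claim_equal_blist : Prop := ∀ (lst : List Int × Int), Dom_blist lst → Pre_blist lst → Spec_blist lst (blist lst)

-- ===== LEMMAS AND PROOFS =====

theorem perm_rot3 {α : Type} (x y z : α) (l : List α) : (x :: y :: z :: l).Perm (z :: x :: y :: l) :=
  (List.Perm.cons x (List.Perm.swap z y l)).trans (List.Perm.swap z x (y :: l))

-- Invariant of B's one-pass fold: its result (q.1, q.2) together with some leftover list t is a
-- permutation of a :: b :: (map abs rest), q.1 ≤ q.2, every leftover is ≥ q.2, and both kept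
-- values only ever decrease.
theorem blist_fold_inv (rest : List Int) : ∀ (a b : Int), a ≤ b →
    ∃ t : List Int,
      (a :: b :: rest.map (fun j => |j|)).Perm
        ((rest.foldl blistStep (a, b)).1 :: (rest.foldl blistStep (a, b)).2 :: t) ∧
      (∀ x ∈ t, (rest.foldl blistStep (a, b)).2 ≤ x) ∧
      (rest.foldl blistStep (a, b)).1 ≤ (rest.foldl blistStep (a, b)).2 ∧
      (rest.foldl blistStep (a, b)).1 ≤ a ∧ (rest.foldl blistStep (a, b)).2 ≤ b := by
  induction rest with
  | nil =>
      intro a b hab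
      exact ⟨[], List.Perm.refl _, by simp, hab, le_refl _, le_refl _⟩
  | cons v rs ih =>
      intro a b hab
      simp only [List.foldl_cons, List.map_cons, blistStep]
      by_cases h1 : |v| < a
      · simp only [if_pos h1]
        obtain ⟨t, hperm, ht, hq, hq1, hq2⟩ := ih |v| a (le_of_lt h1)
        refine ⟨b :: t, ?_, ?_, hq, le_trans hq1 (le_of_lt h1), le_trans hq2 hab⟩
        · exact ((perm_rot3 b |v| a _).symm.trans (hperm.cons b)).trans (perm_rot3 _ _ b t).symm
        · intro x hx
          rcases List.mem_cons.mp hx with hx | hx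
          · subst hx; exact le_trans hq2 hab
          · exact ht x hx
      · by_cases h2 : |v| < b
        · simp only [if_neg h1, if_pos h2]
          obtain ⟨t, hperm, ht, hq, hq1, hq2⟩ := ih a |v| (le_of_not_gt h1)
          refine ⟨b :: t, ?_, ?_, hq, hq1, le_trans hq2 (le_of_lt h2)⟩
          · exact ((List.Perm.swap b a _).trans (hperm.cons b)).trans (perm_rot3 _ _ b t).symm
          · intro x hx
            rcases List.mem_cons.mp hx with hx | hx
            · subst hx; exact le_trans hq2 (le_of_lt h2)
            · exact ht x hx
        · simp only [if_neg h1, if_neg h2]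
          obtain ⟨t, hperm, ht, hq, hq1, hq2⟩ := ih a b hab
          refine ⟨|v| :: t, ?_, ?_, hq, hq1, hq2⟩
          · exact ((perm_rot3 a b (|v|) _).trans (hperm.cons _)).trans (perm_rot3 _ _ (|v|) t).symm
          · intro x hx
            rcases List.mem_cons.mp hx with hx | hx
            · subst hx; exact le_trans hq2 (le_of_not_gt h2)
            · exact ht x hx

theorem blist_spec : Claim_equal_blist := by
  intro lst _ hpre
  unfold Spec_blist blist blist_alt
  by_cases hf : lst.2 = 1
  · simp [hf]
  · simp only [if_neg hf]
    obtain ⟨-, hlen⟩ := hpre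
    obtain ⟨x, y, rest, hxy⟩ : ∃ x y rest, lst.1 = x :: y :: rest := by
      match h : lst.1 with
      | [] => exact absurd (hlen hf) (by simp [h])
      | [x] => exact absurd (hlen hf) (by simp [h])
      | x :: y :: rest => exact ⟨x, y, rest, rfl⟩
    rw [hxy]
    -- seed of B's pass: the two first absolute values, ordered
    set a0 := if |y| < |x| then |y| else |x| with ha0
    set b0 := if |y| < |x| then |x| else |y| with hb0
    have hseed : (if |y| < |x| then (|y|, |x|) else (|x|, |y|)) = (a0, b0) := by
      by_cases h : |y| < |x| <;> simp [ha0, hb0, h]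
    have hab : a0 ≤ b0 := by by_cases h : |y| < |x| <;> simp [ha0, hb0, h] <;> omega
    have hperm0 : (a0 :: b0 :: rest.map (fun j => |j|)).Perm (|x| :: |y| :: rest.map (fun j => |j|)) := by
      by_cases h : |y| < |x| <;> simp only [ha0, hb0, h]
      · exact List.Perm.swap _ _ _
      · exact List.Perm.refl _
    obtain ⟨t, hperm, ht, hq, -, -⟩ := blist_fold_inv rest a0 b0 hab
    set q := rest.foldl blistStep (a0, b0) with hqdef
    -- A's sorted list starts with exactly B's two kept values
    have hsorted : PySem.List.sorted ((x :: y :: rest).map (fun j => |j|)) (fun x => x) false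
        = q.1 :: q.2 :: PySem.List.sorted t (fun x => x) false := by
      apply PySem.List.sorted_id_eq_of_perm_of_pairwise
      · have hmap : (x :: y :: rest).map (fun j => |j|) = |x| :: |y| :: rest.map (fun j => |j|) := rfl
        rw [hmap]
        exact (((PySem.List.sorted_perm t _ _).cons _).cons _).trans (hperm.symm.trans hperm0)
      · refine List.Pairwise.cons ?_ (List.Pairwise.cons ?_ ?_)
        · intro z hz
          rcases List.mem_cons.mp hz with hz | hz
          · exact hz ▸ hq
          · exact le_trans hq (ht z ((PySem.List.mem_sorted _ _ _ _).mp hz))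
        · intro z hz
          exact ht z ((PySem.List.mem_sorted _ _ _ _).mp hz)
        · exact PySem.List.sorted_pairwise t (fun x => x) 
    simp only [hsorted, hseed]
    rw [PySem.List.pyGet?_zero_cons, show ((1:Int)) = ((1:Nat):Int) by norm_num,
       PySem.List.pyGet?_natCast]
    simp only [List.getElem?_cons_succ, List.getElem?_cons_zero, Option.getD_some]
    rw [abs_sub_comm]
    exact abs_of_nonneg (sub_nonneg.mpr hq)
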